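-- pv_equiv track=rewrite | github.com/netwrix-tkm/Netwrix-Knowledge-Base | .github/workflows/detect_duplicates.py | most_similar_snippet
-- ===== SOURCE A (Python) =====
-- def most_similar_snippet(text1, text2, n=10):
--     """Find the most similar n-gram snippet between two texts."""
--     words1 = text1.split()
--     words2 = text2.split()
--     max_overlap = 0
--     best_snippet = ("", "")
--
--     # Create n-grams for both texts
--     ngrams1 = [" ".join(words1[i:i+n]) for i in range(len(words1)-n+1)]
--     ngrams2 = [" ".join(words2[i:i+n]) for i in range(len(words2)-n+1)]
--
--     for ng1 in ngrams1:
--         for ng2 in ngrams2: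
--             # Overlap: number of shared words
--             overlap = len(set(ng1.split()) & set(ng2.split()))
--             if overlap > max_overlap:
--                 max_overlap = overlap
--                 best_snippet = (ng1, ng2)
--     return best_snippet
-- ===== SOURCE B (Python) =====
-- def most_similar_snippet(text1, text2, n=10):
--     """Find the most similar n-gram snippet between two texts.
--
--     Inverted-index algorithm: map each word to the window indices containing
--     it in each text, accumulate shared-word counts per (i, j) window pair in
--     a dict, then scan window pairs row-major for the first strict maximum.
--     """
--     words1 = text1.split()
--     words2 = text2.split()
--     m1 = len(words1) - n + 1
--     m2 = len(words2) - n + 1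
--
--     idx1 = {}
--     for i in range(m1):
--         for w in set(words1[i:i+n]):
--             idx1.setdefault(w, []).append(i)
--     idx2 = {}
--     for j in range(m2):
--         for w in set(words2[j:j+n]):
--             idx2.setdefault(w, []).append(j)
--
--     counts = {}
--     for w, is_ in idx1.items():
--         js = idx2.get(w)
--         if js:
--             for i in is_:
--                 for j in js:
--                     counts[(i, j)] = counts.get((i, j), 0) + 1
--
--     best = 0
--     best_pair = None
--     for i in range(m1):
--         for j in range(m2):
--             c = counts.get((i, j), 0)
--             if c > best:
--                 best = c
--                 best_pair = (i, j)
--     if best_pair is None: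
--         return ("", "")
--     i, j = best_pair
--     return (" ".join(words1[i:i+n]), " ".join(words2[j:j+n]))
-- ===== Notes on version B (the rewrite author's own statement) =====
-- stated objective: alternative
-- what changed: B replaces A's nested scan with per-pair set intersections by an inverted index: it maps each word to the window indices containing it in each text, accumulates shared-word counts per (i,j) window pair in a dict keyed by the pair, then scans window pairs row-major once for the first strict maximum and joins the two snippets at the end.
import Mathlib
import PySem

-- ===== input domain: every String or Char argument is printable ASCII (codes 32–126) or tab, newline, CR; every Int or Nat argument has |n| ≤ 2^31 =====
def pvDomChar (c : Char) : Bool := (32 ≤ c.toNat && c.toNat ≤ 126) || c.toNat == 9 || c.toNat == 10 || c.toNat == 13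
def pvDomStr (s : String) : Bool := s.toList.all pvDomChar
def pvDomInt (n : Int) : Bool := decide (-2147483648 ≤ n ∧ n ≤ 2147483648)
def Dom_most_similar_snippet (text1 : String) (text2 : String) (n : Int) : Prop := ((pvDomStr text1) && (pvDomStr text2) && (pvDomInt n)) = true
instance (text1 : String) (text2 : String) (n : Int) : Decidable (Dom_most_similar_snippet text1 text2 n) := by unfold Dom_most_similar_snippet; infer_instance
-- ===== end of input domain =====

-- B replaces A's per-pair set intersections with an inverted word->window index and a
-- (i,j)-pair count dictionary, scanning window pairs once at the end (different algorithm).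


-- ===== PORT A =====
def most_similar_snippet (text1 : String) (text2 : String) (n : Int) : String × String :=
  let words1 := PySem.Str.split₀ text1
  let words2 := PySem.Str.split₀ text2
  let ngrams1 := (PySem.List.pyRange 0 ((words1.length : Int) - n + 1)).map
      (fun i => PySem.Str.join " " (PySem.List.slice words1 (some i) (some (i + n))))
  let ngrams2 := (PySem.List.pyRange 0 ((words2.length : Int) - n + 1)).map
      (fun i => PySem.Str.join " " (PySem.List.slice words2 (some i) (some (i + n))))
  let res := ngrams1.foldl (fun st ng1 =>
      ngrams2.foldl (fun st ng2 =>
        let overlap := PySem.Set.len (PySem.Set.inter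
          (PySem.Set.ofList (PySem.Str.split₀ ng1)) (PySem.Set.ofList (PySem.Str.split₀ ng2)))
        if overlap > st.1 then (overlap, (ng1, ng2)) else st) st)
    ((0 : Int), ("", ""))
  res.2

-- ===== PORT B =====
def most_similar_snippet_alt (text1 : String) (text2 : String) (n : Int) : String × String :=
  let words1 := PySem.Str.split₀ text1
  let words2 := PySem.Str.split₀ text2
  let m1 : Int := (words1.length : Int) - n + 1
  let m2 : Int := (words2.length : Int) - n + 1
  let idx1 := (PySem.List.pyRange 0 m1).foldl (fun d i =>
      (PySem.Set.ofList (PySem.List.slice words1 (some i) (some (i + n)))).foldl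
        (fun d w => PySem.Dict.modify d w [] (· ++ [i])) d) PySem.Dict.empty
  let idx2 := (PySem.List.pyRange 0 m2).foldl (fun d j =>
      (PySem.Set.ofList (PySem.List.slice words2 (some j) (some (j + n)))).foldl
        (fun d w => PySem.Dict.modify d w [] (· ++ [j])) d) PySem.Dict.empty
  let counts : PySem.Dict (Int × Int) Int := idx1.items.foldl (fun c e =>
      match idx2.get? e.1 with
      | none => c
      | some js => if js.isEmpty then c else
          e.2.foldl (fun c i => js.foldl
            (fun c j => PySem.Dict.insert c (i, j) (PySem.Dict.getD c (i, j) 0 + 1)) c) c)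
    PySem.Dict.empty
  let best := (PySem.List.pyRange 0 m1).foldl (fun st i =>
      (PySem.List.pyRange 0 m2).foldl (fun st j =>
        let c := PySem.Dict.getD counts (i, j) 0
        if c > st.1 then (c, some (i, j)) else st) st)
    ((0 : Int), (none : Option (Int × Int)))
  match best.2 with
  | none => ("", "")
  | some (i, j) =>
      (PySem.Str.join " " (PySem.List.slice words1 (some i) (some (i + n))),
       PySem.Str.join " " (PySem.List.slice words2 (some j) (some (j + n))))

-- ===== PRECONDITION & SPEC =====
def Spec_most_similar_snippet (text1 : String) (text2 : String) (n : Int) (out : String × String) : Prop := out = most_similar_snippet_alt text1 text2 n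
instance (text1 : String) (text2 : String) (n : Int) (out : String × String) : Decidable (Spec_most_similar_snippet text1 text2 n out) := by unfold Spec_most_similar_snippet; infer_instance

-- ===== CLAIM (what is proved, stated in full; the proofs are below) =====
def Claim_equal_most_similar_snippet : Prop := ∀ (text1 : String) (text2 : String) (n : Int), Dom_most_similar_snippet text1 text2 n → Spec_most_similar_snippet text1 text2 n (most_similar_snippet text1 text2 n)

-- ===== LEMMAS AND PROOFS =====

-- ---- split₀ facts: every word of s.split() is nonempty and whitespace-free ----
theorem pv_go_sound (s : List Char) : ∀ (cur : List Char) (acc : List (List Char)),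
    (∀ c ∈ cur, PySem.Chars.isspace c = false) →
    (∀ w ∈ acc, w ≠ [] ∧ ∀ c ∈ w, PySem.Chars.isspace c = false) →
    ∀ w ∈ PySem.Chars.split₀.go s cur acc, w ≠ [] ∧ ∀ c ∈ w, PySem.Chars.isspace c = false := by
  induction s with
  | nil =>
    intro cur acc hcur hacc w hw
    by_cases h : cur = []
    · subst h; simpa [PySem.Chars.split₀.go] using hacc w (by simpa [PySem.Chars.split₀.go] using hw)
    · have hne : cur.isEmpty = false := by simpa [List.isEmpty_iff] using h
      simp [PySem.Chars.split₀.go, hne] at hw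
      rcases hw with hw | hw
      · exact hacc w hw
      · subst hw
        exact ⟨by simpa using h, fun c hc => hcur c (by simpa using hc)⟩
  | cons c rest ih =>
    intro cur acc hcur hacc w hw
    by_cases hc : PySem.Chars.isspace c = true
    · rw [show PySem.Chars.split₀.go (c :: rest) cur acc
            = if cur.isEmpty then PySem.Chars.split₀.go rest [] acc
              else PySem.Chars.split₀.go rest [] (cur.reverse :: acc) by
          simp [PySem.Chars.split₀.go, hc]] at hw
      by_cases h : cur = []
      · subst h; simp at hw
        exact ih [] acc (by simp) hacc w hw
      · have hne : cur.isEmpty = false := by simpa [List.isEmpty_iff] using h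
        rw [hne] at hw; simp at hw
        refine ih [] (cur.reverse :: acc) (by simp) ?_ w hw
        intro u hu
        rw [List.mem_cons] at hu
        rcases hu with hu | hu
        · subst hu
          exact ⟨by simpa using h, fun d hd => hcur d (by simpa using hd)⟩
        · exact hacc u hu
    · have hc' : PySem.Chars.isspace c = false := by simpa using hc
      rw [show PySem.Chars.split₀.go (c :: rest) cur acc
            = PySem.Chars.split₀.go rest (c :: cur) acc by
          simp [PySem.Chars.split₀.go, hc']] at hw
      refine ih (c :: cur) acc ?_ hacc w hw
      intro d hd
      rw [List.mem_cons] at hd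
      rcases hd with hd | hd
      · simpa [hd] using hc'
      · exact hcur d hd

theorem pv_split₀_words (s : List Char) :
    ∀ w ∈ PySem.Chars.split₀ s, w ≠ [] ∧ ∀ c ∈ w, PySem.Chars.isspace c = false :=
  pv_go_sound s [] [] (by simp) (by simp)

-- ---- go over a whitespace-free word consumes it into cur ----
theorem pv_go_word (w : List Char) (hw : ∀ c ∈ w, PySem.Chars.isspace c = false) :
    ∀ (s cur : List Char) (acc : List (List Char)),
    PySem.Chars.split₀.go (w ++ s) cur acc = PySem.Chars.split₀.go s (w.reverse ++ cur) acc := by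
  induction w with
  | nil => intro s cur acc; simp
  | cons c rest ih =>
    intro s cur acc
    have hc : PySem.Chars.isspace c = false := hw c (by simp)
    rw [show PySem.Chars.split₀.go ((c :: rest) ++ s) cur acc
          = PySem.Chars.split₀.go (rest ++ s) (c :: cur) acc by
        simp [PySem.Chars.split₀.go, hc]]
    rw [ih (fun d hd => hw d (by simp [hd])) s (c :: cur) acc]
    simp

-- ---- split₀ (join " " ws) = ws for nonempty whitespace-free words ----
theorem pv_join_go (ws : List (List Char))
    (h1 : ∀ w ∈ ws, w ≠ []) (h2 : ∀ w ∈ ws, ∀ c ∈ w, PySem.Chars.isspace c = false) :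
    ∀ acc, PySem.Chars.split₀.go (PySem.Chars.join [' '] ws) [] acc = acc.reverse ++ ws := by
  induction ws with
  | nil => intro acc; simp [PySem.Chars.join, List.intercalate, PySem.Chars.split₀.go]
  | cons w rest ih =>
    intro acc
    cases rest with
    | nil =>
      have hw1 : w ≠ [] := h1 w (by simp)
      have hcur : w.reverse.isEmpty = false := by
        simpa [List.isEmpty_iff] using hw1
      have : PySem.Chars.join [' '] [w] = w ++ [] := by
        simp [PySem.Chars.join, List.intercalate]
      rw [this, pv_go_word w (h2 w (by simp))]
      simp [PySem.Chars.split₀.go, hcur]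
    | cons w' rest' =>
      have hw1 : w ≠ [] := h1 w (by simp)
      have hcur : w.reverse.isEmpty = false := by
        simpa [List.isEmpty_iff] using hw1
      have hj : PySem.Chars.join [' '] (w :: w' :: rest')
          = w ++ (' ' :: PySem.Chars.join [' '] (w' :: rest')) := by
        simp [PySem.Chars.join, List.intercalate, List.intersperse]
      rw [hj, pv_go_word w (h2 w (by simp))]
      rw [show PySem.Chars.split₀.go (' ' :: PySem.Chars.join [' '] (w' :: rest')) (w.reverse ++ []) acc
            = PySem.Chars.split₀.go (PySem.Chars.join [' '] (w' :: rest')) [] (w :: acc) by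
          simp [PySem.Chars.split₀.go, hcur, show PySem.Chars.isspace ' ' = true by decide]]
      rw [ih (fun u hu => h1 u (by simp [hu])) (fun u hu => h2 u (by simp [hu])) (w :: acc)]
      simp

theorem pv_split_join (ws : List (List Char))
    (h1 : ∀ w ∈ ws, w ≠ []) (h2 : ∀ w ∈ ws, ∀ c ∈ w, PySem.Chars.isspace c = false) :
    PySem.Chars.split₀ (PySem.Chars.join [' '] ws) = ws := by
  unfold PySem.Chars.split₀
  rw [pv_join_go ws h1 h2 []]
  simp

theorem pv_str_split_join (ws : List String)
    (h : ∀ w ∈ ws, w.toList ≠ [] ∧ ∀ c ∈ w.toList, PySem.Chars.isspace c = false) :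
    PySem.Str.split₀ (PySem.Str.join " " ws) = ws := by
  unfold PySem.Str.split₀
  rw [PySem.Str.toList_join]
  rw [show (" " : String).toList = [' '] by decide]
  rw [pv_split_join (ws.map String.toList)
        (by intro w hw; rcases List.mem_map.1 hw with ⟨u, hu, rfl⟩; exact (h u hu).1)
        (by intro w hw; rcases List.mem_map.1 hw with ⟨u, hu, rfl⟩; exact (h u hu).2)]
  rw [List.map_map]
  conv_rhs => rw [← List.map_id ws]
  exact List.map_congr_left (fun w _ => String.ofList_toList)

theorem pv_words_good (t : String) :
    ∀ w ∈ PySem.Str.split₀ t, w.toList ≠ [] ∧ ∀ c ∈ w.toList, PySem.Chars.isspace c = false := by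
  intro w hw
  unfold PySem.Str.split₀ at hw
  rcases List.mem_map.1 hw with ⟨u, hu, rfl⟩
  have := pv_split₀_words t.toList u hu
  simpa [String.toList_ofList] using this

-- ---- proof-side abbreviations ----
def pvWin (t : String) (n : Int) (i : Int) : List String :=
  PySem.List.slice (PySem.Str.split₀ t) (some i) (some (i + n))

def pvIdx (t : String) (n : Int) : List Int :=
  PySem.List.pyRange 0 (((PySem.Str.split₀ t).length : Int) - n + 1)

def pvOv (t1 t2 : String) (n : Int) (p : Int × Int) : Int :=
  (List.countP (fun w => PySem.Set.contains (PySem.Set.ofList (pvWin t2 n p.2)) w)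
    (PySem.Set.ofList (pvWin t1 n p.1)) : Int)

def pvG (t1 t2 : String) (n : Int) (p : Int × Int) : String × String :=
  (PySem.Str.join " " (pvWin t1 n p.1), PySem.Str.join " " (pvWin t2 n p.2))

def pvStepA (ov : Int × Int → Int) (g : Int × Int → String × String)
    (st : Int × (String × String)) (p : Int × Int) : Int × (String × String) :=
  if ov p > st.1 then (ov p, g p) else st

def pvStepB (ov : Int × Int → Int)
    (st : Int × Option (Int × Int)) (p : Int × Int) : Int × Option (Int × Int) :=
  if ov p > st.1 then (ov p, some p) else st

def pvFin (g : Int × Int → String × String) : Option (Int × Int) → String × String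
  | none => ("", "")
  | some p => g p

def pvP (t : String) (n : Int) : List (String × Int) :=
  (pvIdx t n).flatMap (fun i => (PySem.Set.ofList (pvWin t n i)).map (fun w => (w, i)))

def pvD (t : String) (n : Int) : PySem.Dict String (List Int) :=
  (pvP t n).foldl (fun d p => PySem.Dict.modify d p.1 [] (· ++ [p.2])) PySem.Dict.empty

def pvCnt (t : String) (n : Int) (w : String) (i : Int) : Nat :=
  ((pvD t n).getD w []).count i

def pvChunk (t2 : String) (n : Int) (e : String × List Int) : List (Int × Int) :=
  match (pvD t2 n).get? e.1 with
  | none => []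
  | some js => if js.isEmpty then [] else e.2.flatMap (fun i => js.map (fun j => (i, j)))

def pvL (t1 t2 : String) (n : Int) : List (Int × Int) :=
  (pvD t1 n).items.flatMap (pvChunk t2 n)

def pvC (t1 t2 : String) (n : Int) : PySem.Dict (Int × Int) Int :=
  (pvL t1 t2 n).foldl (fun c p => PySem.Dict.insert c p (PySem.Dict.getD c p 0 + 1))
    PySem.Dict.empty

-- ---- generic fold / counting lemmas ----
theorem pv_foldl_nested {α β γ σ : Type} (step : σ → γ → σ) (g : α → List β) (h : α → β → γ)
    (l : List α) (init : σ) :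
    l.foldl (fun s a => (g a).foldl (fun s b => step s (h a b)) s) init
      = (l.flatMap (fun a => (g a).map (h a))).foldl step init := by
  induction l generalizing init with
  | nil => rfl
  | cons a l ih => simp [List.foldl_append, List.foldl_map, ih]

theorem pv_foldl_flat {α σ : Type} (step : σ → α → σ) {β : Type} (g : β → List α)
    (l : List β) (init : σ) :
    l.foldl (fun s e => (g e).foldl step s) init = (l.flatMap g).foldl step init := by
  induction l generalizing init with
  | nil => rfl
  | cons e l ih => simp [List.foldl_append, ih]

theorem pv_pyRange_zero (m : Int) :
    PySem.List.pyRange 0 m = (List.range m.toNat).map (fun (k : Nat) => (k : Int)) := by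
  by_cases h : 0 < m
  · have e : m = (m.toNat : Int) := by omega
    conv_lhs => rw [e, PySem.List.pyRange_zero_natCast]
  · have h1 : m.toNat = 0 := by omega
    rw [h1]
    simp [PySem.List.pyRange, h]

theorem pv_nodup_pyRange (m : Int) : (PySem.List.pyRange 0 m).Nodup := by
  rw [pv_pyRange_zero]
  exact (List.nodup_range).map (fun a b hab => by exact_mod_cast hab)

theorem pv_sum_ite_single (l : List Int) (hl : l.Nodup) (i : Int) (c : Nat) :
    (l.map (fun a => if a = i then c else 0)).sum = if i ∈ l then c else 0 := by
  induction l with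
  | nil => simp
  | cons a l ih =>
    have hnd := (List.nodup_cons.1 hl)
    rw [List.map_cons, List.sum_cons, ih hnd.2]
    by_cases hai : a = i
    · subst hai
      have : a ∉ l := hnd.1
      simp [this]
    · simp [hai, List.mem_cons, Ne.symm hai]

theorem pv_sum_ite_count (l : List Int) (i : Int) (k : Nat) :
    (l.map (fun a => if a = i then k else 0)).sum = l.count i * k := by
  induction l with
  | nil => simp
  | cons a l ih =>
    rw [List.map_cons, List.sum_cons, ih, List.count_cons]
    by_cases hai : a = i
    · simp [hai]; ring
    · simp [hai]

theorem pv_sum_indicator {α : Type} (l : List α) (p : α → Prop) [DecidablePred p] :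
    (l.map (fun a => if p a then 1 else 0)).sum = l.countP (fun a => decide (p a)) := by
  induction l with
  | nil => simp
  | cons a l ih =>
    rw [List.map_cons, List.sum_cons, ih, List.countP_cons]
    by_cases hp : p a <;> simp [hp, Nat.add_comm]

theorem pv_count_map_pair (s : List String) (i' : Int) (w : String) (i : Int) :
    (s.map (fun w' => (w', i'))).count (w, i) = if i' = i then s.count w else 0 := by
  induction s with
  | nil => simp
  | cons a s ih =>
    rw [List.map_cons, List.count_cons, ih, List.count_cons]
    by_cases hii : i' = i
    · subst hii
      by_cases haw : a = w <;> simp [haw, Prod.ext_iff]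
    · simp [Prod.ext_iff, hii]

theorem pv_count_map_pair' (js : List Int) (a i j : Int) :
    (js.map (fun b => (a, b))).count (i, j) = if a = i then js.count j else 0 := by
  induction js with
  | nil => simp
  | cons b js ih =>
    rw [List.map_cons, List.count_cons, ih, List.count_cons]
    by_cases hai : a = i
    · subst hai
      by_cases hbj : b = j <;> simp [hbj, Prod.ext_iff]
    · simp [Prod.ext_iff, hai]

theorem pv_count_prod (is js : List Int) (i j : Int) :
    (is.flatMap (fun a => js.map (fun b => (a, b)))).count (i, j)
      = is.count i * js.count j := by
  rw [List.count_flatMap]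
  have : is.map (List.count (i, j) ∘ fun a => js.map (fun b => (a, b)))
      = is.map (fun a => if a = i then js.count j else 0) :=
    List.map_congr_left (fun a _ => by simp [Function.comp, pv_count_map_pair'])
  rw [this, pv_sum_ite_count]

theorem pv_count_map_snd (l : List (String × Int)) (w : String) (i : Int)
    (h : ∀ p ∈ l, p.1 = w) :
    (l.map Prod.snd).count i = l.count (w, i) := by
  induction l with
  | nil => simp
  | cons p l ih
  =>
    rw [List.map_cons, List.count_cons, List.count_cons,
      ih (fun q hq => h q (by simp [hq]))]
    have hp : p.1 = w := h p (by simp)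
    by_cases hpi : p.2 = i
    · simp [Prod.ext_iff, hp, hpi]
    · simp [Prod.ext_iff, hpi]

-- ---- overlap of A's joined n-grams ----
theorem pv_len_inter (s t : PySem.Set String) :
    PySem.Set.len (PySem.Set.inter s t)
      = (List.countP (fun w => PySem.Set.contains t w) s : Int) := by
  simp [PySem.Set.len, PySem.Set.inter, List.countP_eq_length_filter]

theorem pv_win_good (t : String) (n : Int) (i : Int) :
    PySem.Str.split₀ (PySem.Str.join " " (pvWin t n i)) = pvWin t n i := by
  refine pv_str_split_join (pvWin t n i) ?_
  intro w hw
  exact pv_words_good t w (PySem.List.mem_of_mem_slice _ _ _ hw)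

theorem pv_A_eq (t1 t2 : String) (n : Int) :
    most_similar_snippet t1 t2 n
      = ((pvIdx t1 n).foldl (fun st i =>
          (pvIdx t2 n).foldl (fun st j =>
            pvStepA (pvOv t1 t2 n) (pvG t1 t2 n) st (i, j)) st) (0, ("", ""))).2 := by
  simp only [most_similar_snippet, List.foldl_map]
  refine congrArg Prod.snd ?_
  refine PySem.List.foldl_congr_mem _ _ _ _ ?_
  intro st i _
  refine PySem.List.foldl_congr_mem _ _ _ _ ?_
  intro st' j _
  show (if PySem.Set.len (PySem.Set.inter
          (PySem.Set.ofList (PySem.Str.split₀ (PySem.Str.join " " (pvWin t1 n i))))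
          (PySem.Set.ofList (PySem.Str.split₀ (PySem.Str.join " " (pvWin t2 n j))))) > st'.1
        then (PySem.Set.len (PySem.Set.inter
          (PySem.Set.ofList (PySem.Str.split₀ (PySem.Str.join " " (pvWin t1 n i))))
          (PySem.Set.ofList (PySem.Str.split₀ (PySem.Str.join " " (pvWin t2 n j))))),
          (PySem.Str.join " " (pvWin t1 n i), PySem.Str.join " " (pvWin t2 n j)))
        else st')
      = pvStepA (pvOv t1 t2 n) (pvG t1 t2 n) st' (i, j)
  rw [pv_win_good t1 n i, pv_win_good t2 n j, pv_len_inter]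
  rfl

-- ---- B's dictionaries, flattened ----
theorem pv_idx_eq (t : String) (n : Int) :
    (PySem.List.pyRange 0 (((PySem.Str.split₀ t).length : Int) - n + 1)).foldl (fun d i =>
        (PySem.Set.ofList (PySem.List.slice (PySem.Str.split₀ t) (some i) (some (i + n)))).foldl
          (fun d w => PySem.Dict.modify d w [] (· ++ [i])) d) PySem.Dict.empty
      = pvD t n :=
  pv_foldl_nested (fun d (p : String × Int) => PySem.Dict.modify d p.1 [] (· ++ [p.2]))
    (fun i => PySem.Set.ofList (pvWin t n i)) (fun i w => (w, i)) (pvIdx t n) PySem.Dict.empty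

theorem pv_counts_eq (t1 t2 : String) (n : Int) :
    (pvD t1 n).items.foldl (fun c e =>
        match (pvD t2 n).get? e.1 with
        | none => c
        | some js => if js.isEmpty then c else
            e.2.foldl (fun c i => js.foldl
              (fun c j => PySem.Dict.insert c (i, j) (PySem.Dict.getD c (i, j) 0 + 1)) c) c)
      (PySem.Dict.empty : PySem.Dict (Int × Int) Int)
      = pvC t1 t2 n := by
  have hbody : ∀ (c : PySem.Dict (Int × Int) Int), ∀ e ∈ (pvD t1 n).items,
      (match (pvD t2 n).get? e.1 with
        | none => c
        | some js => if js.isEmpty then c else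
            e.2.foldl (fun c i => js.foldl
              (fun c j => PySem.Dict.insert c (i, j) (PySem.Dict.getD c (i, j) 0 + 1)) c) c)
      = (pvChunk t2 n e).foldl
          (fun c p => PySem.Dict.insert c p (PySem.Dict.getD c p 0 + 1)) c := by
    intro c e _
    unfold pvChunk
    cases hg : (pvD t2 n).get? e.1 with
    | none => rfl
    | some js =>
      by_cases hje : js.isEmpty
      · simp [hje]
      · simp only [hje, Bool.false_eq_true, if_false]
        exact pv_foldl_nested
          (fun c (p : Int × Int) => PySem.Dict.insert c p (PySem.Dict.getD c p 0 + 1))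
          (fun _ => js) (fun i j => (i, j)) e.2 c
  rw [PySem.List.foldl_congr_mem _ _ _ _ hbody]
  rw [pv_foldl_flat]
  rfl

theorem pv_B_eq (t1 t2 : String) (n : Int) :
    most_similar_snippet_alt t1 t2 n
      = pvFin (pvG t1 t2 n)
          (((pvIdx t1 n).foldl (fun st i =>
              (pvIdx t2 n).foldl (fun st j =>
                pvStepB (fun p => PySem.Dict.getD (pvC t1 t2 n) p 0) st (i, j)) st)
            ((0 : Int), (none : Option (Int × Int)))).2) := by
  show (let counts : PySem.Dict (Int × Int) Int :=
          ((PySem.List.pyRange 0 (((PySem.Str.split₀ t1).length : Int) - n + 1)).foldl (fun d i =>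
              (PySem.Set.ofList (PySem.List.slice (PySem.Str.split₀ t1) (some i) (some (i + n)))).foldl
                (fun d w => PySem.Dict.modify d w [] (· ++ [i])) d) PySem.Dict.empty).items.foldl
            (fun c e =>
              match ((PySem.List.pyRange 0 (((PySem.Str.split₀ t2).length : Int) - n + 1)).foldl (fun d j =>
                  (PySem.Set.ofList (PySem.List.slice (PySem.Str.split₀ t2) (some j) (some (j + n)))).foldl
                    (fun d w => PySem.Dict.modify d w [] (· ++ [j])) d) PySem.Dict.empty).get? e.1 with
              | none => c
              | some js => if js.isEmpty then c else
                  e.2.foldl (fun c i => js.foldl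
                    (fun c j => PySem.Dict.insert c (i, j) (PySem.Dict.getD c (i, j) 0 + 1)) c) c)
            PySem.Dict.empty
        let best := (PySem.List.pyRange 0 (((PySem.Str.split₀ t1).length : Int) - n + 1)).foldl (fun st i =>
            (PySem.List.pyRange 0 (((PySem.Str.split₀ t2).length : Int) - n + 1)).foldl (fun st j =>
              let c := PySem.Dict.getD counts (i, j) 0
              if c > st.1 then (c, some (i, j)) else st) st)
          ((0 : Int), (none : Option (Int × Int)))
        match best.2 with
        | none => ("", "")
        | some (i, j) =>
            (PySem.Str.join " " (PySem.List.slice (PySem.Str.split₀ t1) (some i) (some (i + n))),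
             PySem.Str.join " " (PySem.List.slice (PySem.Str.split₀ t2) (some j) (some (j + n))))) = _
  rw [pv_idx_eq t1 n, pv_idx_eq t2 n, pv_counts_eq t1 t2 n]
  show (match (((pvIdx t1 n).foldl (fun st i =>
              (pvIdx t2 n).foldl (fun st j =>
                pvStepB (fun p => PySem.Dict.getD (pvC t1 t2 n) p 0) st (i, j)) st)
            ((0 : Int), (none : Option (Int × Int)))).2) with
        | none => ("", "")
        | some (i, j) => pvG t1 t2 n (i, j)) = _
  cases (((pvIdx t1 n).foldl (fun st i =>
              (pvIdx t2 n).foldl (fun st j =>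
                pvStepB (fun p => PySem.Dict.getD (pvC t1 t2 n) p 0) st (i, j)) st)
            ((0 : Int), (none : Option (Int × Int)))).2) with
  | none => rfl
  | some p => rfl

-- ---- the count dictionary computes A's overlaps ----
theorem pv_D_getD (t : String) (n : Int) (w : String) :
    (pvD t n).getD w [] = ((pvP t n).filter (fun p => p.1 == w)).map (fun p => p.2) := by
  unfold pvD
  rw [PySem.Dict.getD_foldl_modify_append]
  simp [PySem.Dict.getD_empty]

theorem pv_D_nodup_keys (t : String) (n : Int) : (pvD t n).keys.Nodup := by
  unfold pvD
  exact PySem.Dict.nodup_keys_foldl_modify_key (pvP t n) Prod.fst []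
    (fun _ p => (· ++ [p.2])) PySem.Dict.empty PySem.Dict.nodup_keys_empty

theorem pv_D_keys (t : String) (n : Int) (w : String) :
    w ∈ (pvD t n).keys ↔ ∃ i ∈ pvIdx t n, w ∈ pvWin t n i := by
  have h1 : (pvD t n).keys = PySem.Set.update PySem.Dict.empty.keys ((pvP t n).map Prod.fst) :=
    PySem.Dict.keys_foldl_modify_key (pvP t n) Prod.fst [] (fun _ p => (· ++ [p.2]))
      PySem.Dict.empty
  have h2 : (pvD t n).keys = PySem.Set.ofList ((pvP t n).map Prod.fst) := h1
  rw [h2, PySem.Set.mem_ofList]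
  unfold pvP
  simp only [List.mem_map, List.mem_flatMap, PySem.Set.mem_ofList]
  aesop

theorem pv_cnt_char (t : String) (n : Int) (w : String) (i : Int) :
    pvCnt t n w i = if i ∈ pvIdx t n ∧ w ∈ pvWin t n i then 1 else 0 := by
  unfold pvCnt
  rw [pv_D_getD]
  rw [pv_count_map_snd _ w i (by
    intro p hp
    have := List.of_mem_filter hp
    exact eq_of_beq this)]
  rw [List.count_filter (by simp)]
  unfold pvP
  rw [List.count_flatMap]
  have hmap : (pvIdx t n).map
        (List.count (w, i) ∘ fun i' => (PySem.Set.ofList (pvWin t n i')).map (fun w' => (w', i')))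
      = (pvIdx t n).map (fun i' =>
          if i' = i then (if w ∈ pvWin t n i then 1 else 0) else 0) := by
    refine List.map_congr_left (fun i' _ => ?_)
    simp only [Function.comp]
    rw [pv_count_map_pair]
    by_cases hii : i' = i
    · subst hii
      by_cases hw : w ∈ pvWin t n i'
      · rw [List.count_eq_one_of_mem (PySem.Set.nodup_ofList _) ((PySem.Set.mem_ofList _ _).2 hw)]
        simp [hw]
      · rw [List.count_eq_zero_of_not_mem (fun hc => hw ((PySem.Set.mem_ofList _ _).1 hc))]
        simp [hw]
    · rw [if_neg hii, if_neg hii]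
  rw [hmap, pv_sum_ite_single _ (by unfold pvIdx; exact pv_nodup_pyRange _)]
  by_cases hi : i ∈ pvIdx t n <;> by_cases hw : w ∈ pvWin t n i <;> simp [hi, hw]

theorem pv_count_correct (t1 t2 : String) (n : Int) (i j : Int)
    (hi : i ∈ pvIdx t1 n) (hj : j ∈ pvIdx t2 n) :
    PySem.Dict.getD (pvC t1 t2 n) (i, j) 0 = pvOv t1 t2 n (i, j) := by
  have h0 : PySem.Dict.getD (pvC t1 t2 n) (i, j) 0 = ((pvL t1 t2 n).count (i, j) : Int) := by
    unfold pvC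
    rw [PySem.Dict.getD_foldl_insert_add_one]
    simp [PySem.Dict.getD_empty]
  have hchunk : ∀ e ∈ (pvD t1 n).items,
      (pvChunk t2 n e).count (i, j) = e.2.count i * ((pvD t2 n).getD e.1 []).count j := by
    intro e _
    unfold pvChunk
    cases hg : (pvD t2 n).get? e.1 with
    | none =>
      rw [PySem.Dict.getD_eq_get?_getD, hg]
      simp
    | some js =>
      rw [PySem.Dict.getD_eq_get?_getD, hg]
      by_cases hje : js.isEmpty
      · rw [List.isEmpty_iff] at hje
        subst hje
        simp
      · simp only [hje, Bool.false_eq_true, if_false]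
        exact pv_count_prod e.2 js i j
  have h1 : (pvL t1 t2 n).count (i, j)
      = ((pvD t1 n).keys.map (fun w => pvCnt t1 n w i * pvCnt t2 n w j)).sum := by
    unfold pvL
    rw [List.count_flatMap]
    rw [List.map_congr_left (fun e he => by
      simpa [Function.comp] using hchunk e he)]
    rw [PySem.Dict.items_eq_map_keys (pvD t1 n) (pv_D_nodup_keys t1 n) []]
    rw [List.map_map]
    rfl
  have h2 : ((pvD t1 n).keys.map (fun w => pvCnt t1 n w i * pvCnt t2 n w j)).sum
      = (pvD t1 n).keys.countP (fun w => decide (w ∈ pvWin t1 n i ∧ w ∈ pvWin t2 n j)) := by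
    have hterm : ∀ w : String,
        (if i ∈ pvIdx t1 n ∧ w ∈ pvWin t1 n i then 1 else 0)
          * (if j ∈ pvIdx t2 n ∧ w ∈ pvWin t2 n j then 1 else 0)
        = if w ∈ pvWin t1 n i ∧ w ∈ pvWin t2 n j then (1 : Nat) else 0 := by
      intro w
      by_cases hw1 : w ∈ pvWin t1 n i <;> by_cases hw2 : w ∈ pvWin t2 n j <;>
        simp [hw1, hw2, hi, hj]
    rw [List.map_congr_left (fun w _ => by rw [pv_cnt_char, pv_cnt_char, hterm w])]
    exact pv_sum_indicator _ _
  have h3 : (pvD t1 n).keys.countP (fun w => decide (w ∈ pvWin t1 n i ∧ w ∈ pvWin t2 n j))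
      = List.countP (fun w => PySem.Set.contains (PySem.Set.ofList (pvWin t2 n j)) w)
          (PySem.Set.ofList (pvWin t1 n i)) := by
    rw [List.countP_eq_length_filter, List.countP_eq_length_filter]
    refine List.Perm.length_eq ?_
    rw [List.perm_ext_iff_of_nodup ((pv_D_nodup_keys t1 n).filter _)
      ((PySem.Set.nodup_ofList _).filter _)]
    intro x
    simp only [List.mem_filter, decide_eq_true_eq, PySem.Set.mem_ofList]
    constructor
    · rintro ⟨_, hx1, hx2⟩
      refine ⟨hx1, ?_⟩
      show PySem.Set.contains _ x = true
      rw [show ∀ (s : PySem.Set String) y, PySem.Set.contains s y = List.elem y s from fun _ _ => rfl]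
      rw [List.elem_iff]
      exact (PySem.Set.mem_ofList _ _).2 hx2
    · rintro ⟨hx1, hx2⟩
      rw [show ∀ (s : PySem.Set String) y, PySem.Set.contains s y = List.elem y s from fun _ _ => rfl] at hx2
      rw [List.elem_iff] at hx2
      exact ⟨(pv_D_keys t1 n x).2 ⟨i, hi, hx1⟩, hx1, (PySem.Set.mem_ofList _ _).1 hx2⟩
  rw [h0, h1, h2, h3]
  rfl

-- ---- nested argmax folds: A's value-carrying state vs B's index-carrying state ----
theorem pv_final (ov : Int × Int → Int) (g : Int × Int → String × String)
    (l : List (Int × Int)) :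
    ∀ (a : Int × (String × String)) (b : Int × Option (Int × Int)),
    a.1 = b.1 → a.2 = pvFin g b.2 →
    (l.foldl (pvStepA ov g) a).1 = (l.foldl (pvStepB ov) b).1 ∧
    (l.foldl (pvStepA ov g) a).2 = pvFin g ((l.foldl (pvStepB ov) b).2) := by
  induction l with
  | nil => intro a b h1 h2; exact ⟨h1, h2⟩
  | cons p l ih =>
    intro a b h1 h2
    simp only [List.foldl_cons]
    refine ih _ _ ?_ ?_
    · unfold pvStepA pvStepB
      rw [h1]
      by_cases h : ov p > b.1 <;> simp [h, h1]
    · unfold pvStepA pvStepB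
      rw [h1]
      by_cases h : ov p > b.1 <;> simp [h, pvFin, h2]

-- ===== VERDICT (by name: the statement is the Claim_ definition above) =====
theorem most_similar_snippet_spec : Claim_equal_most_similar_snippet := by
  intro t1 t2 n _
  unfold Spec_most_similar_snippet
  rw [pv_A_eq, pv_B_eq]
  rw [pv_foldl_nested (pvStepA (pvOv t1 t2 n) (pvG t1 t2 n)) (fun _ => pvIdx t2 n)
    (fun i j => (i, j)) (pvIdx t1 n)]
  rw [pv_foldl_nested (pvStepB (fun p => PySem.Dict.getD (pvC t1 t2 n) p 0)) (fun _ => pvIdx t2 n)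
    (fun i j => (i, j)) (pvIdx t1 n)]
  have hcong : ((pvIdx t1 n).flatMap (fun i => (pvIdx t2 n).map (fun j => (i, j)))).foldl
        (pvStepB (fun p => PySem.Dict.getD (pvC t1 t2 n) p 0)) ((0 : Int), none)
      = ((pvIdx t1 n).flatMap (fun i => (pvIdx t2 n).map (fun j => (i, j)))).foldl
        (pvStepB (pvOv t1 t2 n)) ((0 : Int), none) := by
    refine PySem.List.foldl_congr_mem _ _ _ _ ?_
    intro st p hp
    rcases List.mem_flatMap.1 hp with ⟨i, hi, hp'⟩
    rcases List.mem_map.1 hp' with ⟨j, hj, rfl⟩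
    unfold pvStepB
    simp only [pv_count_correct t1 t2 n i j hi hj]
  rw [hcong]
  exact (pv_final (pvOv t1 t2 n) (pvG t1 t2 n) _ (0, ("", "")) (0, none) rfl rfl).2
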